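-- pv_equiv track=rewrite | github.com/anubissbe/knowledgehub | api/services/multi_agent/agents.py | _extract_best_practices
-- ===== SOURCE A (Python) =====
-- from typing import Dict, List, Any, Optional
--
-- def _extract_best_practices(results: List[Dict[str, Any]]) -> List[str]:
--     """Extract general best practices"""
--     practices = [
--         "Use descriptive variable and function names",
--         "Keep functions small and focused",
--         "Write self-documenting code",
--         "Follow DRY (Don't Repeat Yourself) principle",
--         "Handle errors gracefully",
--         "Write unit tests for critical functions",
--         "Use version control effectively",
--         "Document complex logic"
--     ]
--
--     # Filter based on results
--     relevant_practices = []
--     for practice in practices: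
--         if any(
--             any(word in r.get("content", "").lower()
--                 for word in practice.lower().split())
--             for r in results
--         ):
--             relevant_practices.append(practice)
--
--     return relevant_practices[:5]
-- ===== SOURCE B (Python) =====
-- from typing import Dict, List, Any
--
-- def _extract_best_practices(results: List[Dict[str, Any]]) -> List[str]:
--     """Extract general best practices"""
--     practices = [
--         "Use descriptive variable and function names",
--         "Keep functions small and focused",
--         "Write self-documenting code",
--         "Follow DRY (Don't Repeat Yourself) principle",
--         "Handle errors gracefully",
--         "Write unit tests for critical functions",
--         "Use version control effectively",
--         "Document complex logic",
--     ]
--     # one precomputed searchable blob; space-joined, so a whitespace-free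
--     # word can only match inside a single result's content
--     blob = " ".join(r.get("content", "").lower() for r in results)
--     kept = [p for p in practices if any(w in blob for w in p.lower().split())]
--     return kept[:5]
-- ===== Notes on version B (the rewrite author's own statement) =====
-- stated objective: simpler
-- what changed: Instead of re-scanning and re-lowercasing every result's content for each of the 8 practices, B lowercases each content once, joins them into a single space-separated blob, and keeps each practice whose words match the blob via a flat filter comprehension.
import Mathlib
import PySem

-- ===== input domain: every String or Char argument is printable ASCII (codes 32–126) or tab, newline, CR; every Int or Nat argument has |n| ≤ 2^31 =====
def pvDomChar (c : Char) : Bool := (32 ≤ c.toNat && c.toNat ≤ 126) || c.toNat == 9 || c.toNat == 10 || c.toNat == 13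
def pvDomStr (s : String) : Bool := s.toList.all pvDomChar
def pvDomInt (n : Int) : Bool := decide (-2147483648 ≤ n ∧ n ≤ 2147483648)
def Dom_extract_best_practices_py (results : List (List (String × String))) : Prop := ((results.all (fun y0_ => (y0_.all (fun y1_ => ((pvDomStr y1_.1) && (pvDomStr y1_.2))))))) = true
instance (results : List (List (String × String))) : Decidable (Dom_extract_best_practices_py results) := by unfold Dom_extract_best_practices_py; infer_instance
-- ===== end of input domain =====

-- B replaces A's per-practice rescans of every result with one precomputed
-- space-joined lowercase blob searched per word (objective: simpler).

-- ===== PORT A =====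
def pvPracticesA : List String :=
  [ "Use descriptive variable and function names",
    "Keep functions small and focused",
    "Write self-documenting code",
    "Follow DRY (Don't Repeat Yourself) principle",
    "Handle errors gracefully",
    "Write unit tests for critical functions",
    "Use version control effectively",
    "Document complex logic" ]

def extract_best_practices_py (results : List (List (String × String))) : List String :=
  PySem.List.slice
    (pvPracticesA.foldl
      (fun acc practice =>
        if results.any (fun r =>
            (PySem.Str.split₀ (PySem.Str.lower practice)).any
              (fun word => PySem.Str.isIn word (PySem.Str.lower (PySem.Dict.getD ⟨r⟩ "content" ""))))
        then acc ++ [practice] else acc) [])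
    none (some 5)

-- ===== PORT B =====
def pvPracticesB : List String :=
  [ "Use descriptive variable and function names",
    "Keep functions small and focused",
    "Write self-documenting code",
    "Follow DRY (Don't Repeat Yourself) principle",
    "Handle errors gracefully",
    "Write unit tests for critical functions",
    "Use version control effectively",
    "Document complex logic" ]

def extract_best_practices_py_alt (results : List (List (String × String))) : List String :=
  let blob := PySem.Str.join " "
    (results.map (fun r => PySem.Str.lower (PySem.Dict.getD ⟨r⟩ "content" "")))
  (pvPracticesB.filter (fun p =>
     (PySem.Str.split₀ (PySem.Str.lower p)).any (fun w => PySem.Str.isIn w blob))).take 5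

-- ===== PRECONDITION & SPEC =====
def Spec_extract_best_practices_py (results : List (List (String × String))) (out : List String) : Prop := out = extract_best_practices_py_alt results
instance (results : List (List (String × String))) (out : List String) : Decidable (Spec_extract_best_practices_py results out) := by unfold Spec_extract_best_practices_py; infer_instance

-- ===== CLAIM (what is proved, stated in full; the proofs are below) =====
def Claim_equal_extract_best_practices_py : Prop := ∀ (results : List (List (String × String))), Dom_extract_best_practices_py results → Spec_extract_best_practices_py results (extract_best_practices_py results)

-- ===== LEMMAS AND PROOFS =====

-- An infix of `a ++ ' ' :: b` not containing ' ' lies inside `a` or inside `b`.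
theorem pv_infix_append_space {w a b : List Char} (hsp : ' ' ∉ w)
    (h : w <:+: a ++ ' ' :: b) : w <:+: a ∨ w <:+: b := by
  obtain ⟨s, t, hst⟩ := h
  by_cases h1 : s.length + w.length ≤ a.length
  · left
    have h3 : a.take (s.length + w.length) = s ++ w := by
      have := congrArg (List.take (s.length + w.length)) hst
      simpa [List.take_append, List.take_of_length_le, Nat.sub_eq_zero_of_le h1] using this.symm
    exact ⟨s, a.drop (s.length + w.length), by rw [← h3, List.take_append_drop]⟩
  · by_cases h2 : a.length + 1 ≤ s.length
    · right
      have e1 : a.length + 1 - s.length = 0 := by omega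
      have e2 : a.length + 1 - (s ++ w).length = 0 := by simp; omega
      have e3 : a.length + 1 - a.length = 1 := by omega
      have hls : ((s ++ w) ++ t).drop (a.length + 1) = s.drop (a.length + 1) ++ w ++ t := by
        rw [List.drop_append, List.drop_append, e1, e2, List.drop_zero, List.drop_zero,
          List.append_assoc]
      have hrs : (a ++ ' ' :: b).drop (a.length + 1) = b := by
        rw [List.drop_append, List.drop_eq_nil_of_le (by omega), e3, List.nil_append,
          List.drop_one, List.tail_cons]
      have := congrArg (List.drop (a.length + 1)) hst
      rw [hls, hrs] at this
      exact ⟨s.drop (a.length + 1), t, this⟩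
    · exfalso
      have hs : s.length ≤ a.length := by omega
      have hk : a.length - s.length < w.length := by omega
      have hlen : a.length < (s ++ w ++ t).length := by rw [hst]; simp
      have e1 : (s ++ w ++ t)[a.length]'hlen = (a ++ ' ' :: b)[a.length]'(by simp) :=
        List.getElem_of_eq hst _
      have e2 : (a ++ ' ' :: b)[a.length]'(by simp) = ' ' := by
        rw [List.getElem_append_right (le_refl _)]
        simp
      have e3 : (s ++ w ++ t)[a.length]'hlen = w[a.length - s.length]'hk := by
        rw [List.getElem_append_left (by simp; omega), List.getElem_append_right hs]
      have hval : w[a.length - s.length]'hk = ' ' := by rw [← e3, e1, e2]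
      exact hsp (hval ▸ List.getElem_mem hk)

-- A whitespace-free nonempty word is an infix of the space-join iff it is an infix of a part.
theorem pv_infix_join_space {w : List Char} (hw : w ≠ []) (hsp : ' ' ∉ w)
    (cs : List (List Char)) :
    w <:+: PySem.Chars.join [' '] cs ↔ ∃ c ∈ cs, w <:+: c := by
  induction cs with
  | nil => simp [PySem.Chars.join_nil, List.infix_nil, hw]
  | cons c rest ih =>
    cases rest with
    | nil => simp [PySem.Chars.join_singleton]
    | cons d rest' =>
      rw [PySem.Chars.join_cons_cons]
      constructor
      · intro h
        rcases pv_infix_append_space hsp (by simpa using h) with h' | h'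
        · exact ⟨c, by simp, h'⟩
        · obtain ⟨e, he, hwe⟩ := ih.mp h'
          exact ⟨e, by simp [he], hwe⟩
      · rintro ⟨e, he, hwe⟩
        rcases List.mem_cons.mp he with rfl | he'
        · exact hwe.trans (by simpa [List.append_assoc] using
            (List.prefix_append e ([' '] ++ PySem.Chars.join [' '] (d :: rest'))).isInfix)
        · exact (ih.mpr ⟨e, he', hwe⟩).trans (List.suffix_append (c ++ [' ']) _).isInfix

-- the per-practice step: scanning each part equals scanning the space-joined blob
theorem pv_any_blob (ws : List String) (hws : ∀ w ∈ ws, w.toList ≠ [] ∧ ' ' ∉ w.toList)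
    (cs : List String) :
    cs.any (fun c => ws.any (fun w => PySem.Str.isIn w c))
      = ws.any (fun w => PySem.Str.isIn w (PySem.Str.join " " cs)) := by
  rw [Bool.eq_iff_iff]
  simp only [List.any_eq_true]
  constructor
  · rintro ⟨c, hc, w, hw, hin⟩
    refine ⟨w, hw, ?_⟩
    rw [PySem.Str.isIn_iff_infix] at hin ⊢
    rw [PySem.Str.toList_join]
    exact (pv_infix_join_space (hws w hw).1 (hws w hw).2 _).mpr
      ⟨c.toList, List.mem_map_of_mem hc, hin⟩
  · rintro ⟨w, hw, hin⟩
    rw [PySem.Str.isIn_iff_infix, PySem.Str.toList_join] at hin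
    obtain ⟨cl, hcl, hwcl⟩ := (pv_infix_join_space (hws w hw).1 (hws w hw).2 _).mp hin
    obtain ⟨c, hc, rfl⟩ := List.mem_map.mp hcl
    exact ⟨c, hc, w, hw, (PySem.Str.isIn_iff_infix _ _).mpr hwcl⟩

theorem pv_words_ok : ∀ p ∈ pvPracticesB, ∀ w ∈ PySem.Str.split₀ (PySem.Str.lower p),
    w.toList ≠ [] ∧ ' ' ∉ w.toList := by decide

-- ===== VERDICT (by name: the statement is the Claim_ definition above) =====
theorem extract_best_practices_py_spec : Claim_equal_extract_best_practices_py := by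
  intro results _
  unfold Spec_extract_best_practices_py
  unfold extract_best_practices_py extract_best_practices_py_alt
  rw [PySem.List.foldl_append_if_eq_filter]
  refine (PySem.List.slice_to _ (b := 5) (by norm_num)).trans ?_
  show (pvPracticesA.filter (fun practice => results.any fun r =>
      (PySem.Str.split₀ (PySem.Str.lower practice)).any fun word =>
        PySem.Str.isIn word (PySem.Str.lower (PySem.Dict.getD ⟨r⟩ "content" "")))).take 5
    = (pvPracticesB.filter (fun p =>
        (PySem.Str.split₀ (PySem.Str.lower p)).any fun w =>
          PySem.Str.isIn w (PySem.Str.join " "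
            (results.map (fun r => PySem.Str.lower (PySem.Dict.getD ⟨r⟩ "content" "")))))).take 5
  refine congrArg (List.take 5) (List.filter_congr fun p hp => ?_)
  have h := pv_any_blob (PySem.Str.split₀ (PySem.Str.lower p)) (pv_words_ok p hp)
    (results.map (fun r => PySem.Str.lower (PySem.Dict.getD ⟨r⟩ "content" "")))
  rw [← h, List.any_map]
  rfl
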